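-- pv_equiv track=rewrite | github.com/patrickmay/advent-of-code-2018 | day5.py | reduce_polymer
-- ===== SOURCE A (Python) =====
-- def reduce_polymer(polymer):
--     """ Make one pass through POLYMER removing triggered units. """
--     reduced_polymer = ''
--     iterator = iter(range(len(polymer)))
--     for i in iterator:
--         if ((i == len(polymer) - 1)
--             or (not (polymer[i] != polymer[i + 1]
--                      and polymer[i].lower() == polymer[i + 1].lower()))):
--             reduced_polymer += polymer[i]
--         else:
--             next(iterator)
--
--     return reduced_polymer
-- ===== SOURCE B (Python) =====
-- import re
-- import string
--
-- _PAIR_RE = re.compile('|'.join(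
--     c + c.upper() + '|' + c.upper() + c for c in string.ascii_lowercase))
--
--
-- def reduce_polymer(polymer):
--     """ Make one pass through POLYMER removing triggered units. """
--     # re.sub removes non-overlapping reacting pairs left-to-right without
--     # reconsidering the seam, which is exactly A's single greedy pass.
--     return _PAIR_RE.sub('', polymer)
-- ===== Notes on version B (the rewrite author's own statement) =====
-- stated objective: idiomatic
-- what changed: Replaces the index loop with manual iterator skipping (next(iterator)) by a single precompiled regex substitution that deletes every case-swapped ASCII letter pair in one left-to-right non-overlapping pass.
import Mathlib
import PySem

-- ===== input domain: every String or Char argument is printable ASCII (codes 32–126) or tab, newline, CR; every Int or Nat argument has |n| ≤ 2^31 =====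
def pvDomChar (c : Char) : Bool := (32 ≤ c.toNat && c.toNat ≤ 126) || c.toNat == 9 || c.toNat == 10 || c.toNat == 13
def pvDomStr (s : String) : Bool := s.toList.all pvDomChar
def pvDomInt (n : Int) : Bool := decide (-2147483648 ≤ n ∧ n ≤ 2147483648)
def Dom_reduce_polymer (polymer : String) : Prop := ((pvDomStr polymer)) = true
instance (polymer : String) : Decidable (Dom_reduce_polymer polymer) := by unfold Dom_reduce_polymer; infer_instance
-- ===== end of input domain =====

-- B replaces A's index loop (with manual iterator skipping) by one regex substitution
-- deleting every case-swapped ASCII letter pair left-to-right (idiomatic; same single greedy pass).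

-- ===== PORT A =====
-- Python's `for i in iterator` over range(len(polymer)), where `next(iterator)` skips the
-- following index.  All string indexing is in range when evaluated (the `or` short-circuits
-- before polymer[i+1] at the last index), so pyGetD's default ' ' is never read.
-- The string accumulator `reduced_polymer += polymer[i]` is kept as a List Char accumulator
-- wrapped by String.mk at the end (exact: same characters in the same order).
def pvLoopA (cs : List Char) (n : Int) (idxs : List Int) (acc : List Char) : List Char :=
  match idxs with
  | [] => acc
  | i :: rest =>
    if i = n - 1 ∨ ¬(PySem.List.pyGetD cs i ' ' ≠ PySem.List.pyGetD cs (i + 1) ' ' ∧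
        PySem.Chars.lowerChar (PySem.List.pyGetD cs i ' ') =
          PySem.Chars.lowerChar (PySem.List.pyGetD cs (i + 1) ' ')) then
      pvLoopA cs n rest (acc ++ [PySem.List.pyGetD cs i ' '])
    else
      pvLoopA cs n rest.tail acc
termination_by idxs.length
decreasing_by
  all_goals (simp [List.length_tail]; try omega)

def reduce_polymer (polymer : String) : String :=
  String.mk (pvLoopA polymer.toList (PySem.Str.len polymer)
    (PySem.List.pyRange 0 (PySem.Str.len polymer) 1) [])

-- ===== PORT B =====
-- Source B compiles the 52-alternative pattern 'aA|Aa|bB|Bb|…' and returns pattern.sub('', polymer).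
-- pvPairMatch c d = true iff the two-character string cd matches that alternation
-- (c a lowercase ASCII letter and d its uppercase form, or vice versa).
def pvPairMatch (c d : Char) : Bool :=
  (decide ('a' ≤ c) && decide (c ≤ 'z') && (d == PySem.Chars.upperChar c)) ||
  (decide ('A' ≤ c) && decide (c ≤ 'Z') && (d == PySem.Chars.lowerChar c))

-- Hand port of re.sub('', …) for this fixed two-character alternation, exact here:
-- re.sub scans left to right, deletes each non-overlapping leftmost match (two characters)
-- and resumes after it; every alternative has length 2, so this is precisely the scan below.
def pvSubReact : List Char → List Char
  | [] => []
  | [c] => [c]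
  | c :: d :: rest =>
    if pvPairMatch c d then pvSubReact rest else c :: pvSubReact (d :: rest)
termination_by cs => cs.length

def reduce_polymer_alt (polymer : String) : String :=
  String.mk (pvSubReact polymer.toList)

-- ===== PRECONDITION & SPEC =====
def Spec_reduce_polymer (polymer : String) (out : String) : Prop := out = reduce_polymer_alt polymer
instance (polymer : String) (out : String) : Decidable (Spec_reduce_polymer polymer out) := by unfold Spec_reduce_polymer; infer_instance

-- ===== CLAIM (what is proved, stated in full; the proofs are below) =====
def Claim_equal_reduce_polymer : Prop := ∀ (polymer : String), Dom_reduce_polymer polymer → Spec_reduce_polymer polymer (reduce_polymer polymer)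

-- ===== LEMMAS AND PROOFS =====

theorem pv_char_toNat_ofNat (n : Nat) (h : n < 55296) : (Char.ofNat n).toNat = n := by
  unfold Char.ofNat
  rw [dif_pos (Or.inl h)]
  simp [Char.ofNatAux, Char.toNat]

theorem pv_char_le_iff (a b : Char) : a ≤ b ↔ a.toNat ≤ b.toNat := by
  rw [Char.le_def, UInt32.le_iff_toNat_le]; rfl

theorem pv_char_eq_iff (a b : Char) : a = b ↔ a.toNat = b.toNat :=
  ⟨congrArg _, fun h => Char.ext (UInt32.toNat_inj.mp h)⟩

theorem pv_lower_toNat (c : Char) (h : c.toNat ≤ 126) :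
    (PySem.Chars.lowerChar c).toNat =
      if 65 ≤ c.toNat ∧ c.toNat ≤ 90 then c.toNat + 32 else c.toNat := by
  have hA : ('A' : Char).toNat = 65 := by decide
  have hZ : ('Z' : Char).toNat = 90 := by decide
  simp only [PySem.Chars.lowerChar, PySem.Chars.isupper, Bool.and_eq_true, decide_eq_true_eq,
    pv_char_le_iff, hA, hZ]
  split_ifs with h1
  · exact pv_char_toNat_ofNat _ (by omega)
  · rfl

theorem pv_upper_toNat (c : Char) (h : c.toNat ≤ 126) :
    (PySem.Chars.upperChar c).toNat =
      if 97 ≤ c.toNat ∧ c.toNat ≤ 122 then c.toNat - 32 else c.toNat := by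
  have ha : ('a' : Char).toNat = 97 := by decide
  have hz : ('z' : Char).toNat = 122 := by decide
  simp only [PySem.Chars.upperChar, PySem.Chars.islower, Bool.and_eq_true, decide_eq_true_eq,
    pv_char_le_iff, ha, hz]
  split_ifs with h1
  · exact pv_char_toNat_ofNat _ (by omega)
  · rfl

-- On ASCII, "c ≠ d and c.lower() == d.lower()" is exactly "cd matches the letter-pair pattern".
theorem pv_pairMatch_iff (c d : Char) (hc : c.toNat ≤ 126) (hd : d.toNat ≤ 126) :
    pvPairMatch c d = true ↔
      (c ≠ d ∧ PySem.Chars.lowerChar c = PySem.Chars.lowerChar d) := by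
  have ha : ('a' : Char).toNat = 97 := by decide
  have hz : ('z' : Char).toNat = 122 := by decide
  have hA : ('A' : Char).toNat = 65 := by decide
  have hZ : ('Z' : Char).toNat = 90 := by decide
  simp only [pvPairMatch, Bool.or_eq_true, Bool.and_eq_true, decide_eq_true_eq, beq_iff_eq,
    pv_char_le_iff, pv_char_eq_iff, ne_eq, ha, hz, hA, hZ,
    pv_lower_toNat c hc, pv_lower_toNat d hd, pv_upper_toNat c hc, pv_lower_toNat c hc]
  split_ifs <;> omega

theorem pv_pyGetD_nat (cs : List Char) (j : Nat) (h : j < cs.length) :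
    PySem.List.pyGetD cs (j : Int) ' ' = cs[j] := by
  simp [h]

theorem pv_loop_eq (cs : List Char) (hdom : ∀ c ∈ cs, c.toNat ≤ 126) :
    ∀ (m k : Nat) (acc : List Char), cs.length - k ≤ m →
      pvLoopA cs (cs.length : Int) (PySem.List.pyRange (k : Int) (cs.length : Int) 1) acc
        = acc ++ pvSubReact (cs.drop k) := by
  intro m
  induction m with
  | zero =>
    intro k acc hm
    have hk : cs.length ≤ k := by omega
    rw [PySem.List.pyRange_one_eq_nil (by exact_mod_cast hk),
      List.drop_of_length_le hk]
    simp [pvLoopA, pvSubReact]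
  | succ m ih =>
    intro k acc hm
    by_cases hk : cs.length ≤ k
    · rw [PySem.List.pyRange_one_eq_nil (by exact_mod_cast hk),
        List.drop_of_length_le hk]
      simp [pvLoopA, pvSubReact]
    · push_neg at hk
      have hkc : ((k : Int)) < (cs.length : Int) := by exact_mod_cast hk
      rw [PySem.List.pyRange_one_cons hkc]
      rw [pvLoopA]
      have hget : PySem.List.pyGetD cs (k : Int) ' ' = cs[k] := pv_pyGetD_nat cs k hk
      have hdropk : cs.drop k = cs[k] :: cs.drop (k + 1) :=
        List.drop_eq_getElem_cons hk
      by_cases hlast : k + 1 = cs.length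
      · -- last index: the `or` short-circuits and the character is kept
        have hcond : ((k : Int)) = (cs.length : Int) - 1 := by omega
        rw [if_pos (Or.inl hcond)]
        have h2 : ((k : Int)) + 1 = ((k + 1 : Nat) : Int) := by push_cast; ring
        rw [h2, PySem.List.pyRange_one_eq_nil (by omega)]
        rw [pvLoopA]
        have hdrop1 : cs.drop (k + 1) = [] := List.drop_of_length_le (by omega)
        rw [hdropk, hdrop1, hget]
        simp [pvSubReact]
      · have hk1 : k + 1 < cs.length := by omega
        have h2 : ((k : Int)) + 1 = ((k + 1 : Nat) : Int) := by push_cast; ring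
        have hget1 : PySem.List.pyGetD cs ((k : Int) + 1) ' ' = cs[k + 1] := by
          rw [h2]; exact pv_pyGetD_nat cs (k + 1) hk1
        have hdropk1 : cs.drop (k + 1) = cs[k + 1] :: cs.drop (k + 2) :=
          List.drop_eq_getElem_cons hk1
        have hcond1 : ¬ ((k : Int)) = (cs.length : Int) - 1 := by omega
        have hreact := pv_pairMatch_iff cs[k] cs[k + 1]
          (hdom _ (List.getElem_mem hk)) (hdom _ (List.getElem_mem hk1))
        by_cases hr : pvPairMatch cs[k] cs[k + 1] = true
        · -- reacting pair: A consumes the next index, B's scan drops both characters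
          have hnot : ¬ (((k : Int)) = (cs.length : Int) - 1 ∨
              ¬(PySem.List.pyGetD cs (k : Int) ' ' ≠ PySem.List.pyGetD cs ((k : Int) + 1) ' ' ∧
                PySem.Chars.lowerChar (PySem.List.pyGetD cs (k : Int) ' ') =
                  PySem.Chars.lowerChar (PySem.List.pyGetD cs ((k : Int) + 1) ' '))) := by
            rw [hget, hget1]
            push_neg
            exact ⟨hcond1, hreact.mp hr⟩
          rw [if_neg hnot]
          rw [h2, PySem.List.pyRange_one_cons (by exact_mod_cast hk1), List.tail_cons]
          have h3 : ((k + 1 : Nat) : Int) + 1 = ((k + 2 : Nat) : Int) := by push_cast; ring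
          rw [h3, ih (k + 2) acc (by omega)]
          rw [hdropk, hdropk1, pvSubReact, if_pos hr]
        · have hyes : ((k : Int)) = (cs.length : Int) - 1 ∨
              ¬(PySem.List.pyGetD cs (k : Int) ' ' ≠ PySem.List.pyGetD cs ((k : Int) + 1) ' ' ∧
                PySem.Chars.lowerChar (PySem.List.pyGetD cs (k : Int) ' ') =
                  PySem.Chars.lowerChar (PySem.List.pyGetD cs ((k : Int) + 1) ' ')) := by
            rw [hget, hget1]
            right
            intro hcontra
            exact hr (hreact.mpr hcontra)
          rw [if_pos hyes]
          rw [h2, ih (k + 1) (acc ++ [PySem.List.pyGetD cs (k : Int) ' ']) (by omega)]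
          rw [hget, hdropk, hdropk1, pvSubReact, if_neg (by simp [hr]), ← hdropk1]
          simp

-- ===== VERDICT (by name: the statement is the Claim_ definition above) =====
theorem reduce_polymer_spec : Claim_equal_reduce_polymer := by
  intro polymer hdom
  unfold Spec_reduce_polymer reduce_polymer reduce_polymer_alt
  have hdom' : ∀ c ∈ polymer.toList, c.toNat ≤ 126 := by
    intro c hc
    have := List.all_eq_true.mp hdom c hc
    simp only [pvDomChar, Bool.or_eq_true, Bool.and_eq_true, decide_eq_true_eq,
      beq_iff_eq, Nat.le_iff_lt_or_eq] at this
    omega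
  have hlen : PySem.Str.len polymer = (polymer.toList.length : Int) := by
    simp [PySem.Str.len]
  rw [hlen]
  have h0 : (0 : Int) = ((0 : Nat) : Int) := rfl
  rw [h0, pv_loop_eq polymer.toList hdom' polymer.toList.length 0 [] (by omega)]
  simp
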